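-- pv_equiv track=rewrite | github.com/wolabal/dartlab | experiments/024_contingentLiability/step02_parser.py | extractTableBlocks
-- ===== SOURCE A (Python) =====
-- def extractTableBlocks(content: str) -> list[list[str]]:
--     """content에서 |(pipe) 구분 테이블 블록들 추출."""
--     lines = content.split("\n")
--     blocks = []
--     current = []
--     for line in lines:
--         stripped = line.strip()
--         if "|" in stripped:
--             current.append(stripped)
--         else:
--             if current:
--                 blocks.append(current)
--                 current = []
--     if current:
--         blocks.append(current)
--     return blocks
-- ===== SOURCE B (Python) =====
-- def extractTableBlocks(content: str) -> list[list[str]]: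
--     """content에서 |(pipe) 구분 테이블 블록들 추출."""
--     lines = [line.strip() for line in content.split("\n")]
--     blocks = []
--     n = len(lines)
--     i = 0
--     while i < n:
--         if "|" in lines[i]:
--             j = i + 1
--             while j < n and "|" in lines[j]:
--                 j += 1
--             blocks.append(lines[i:j])
--             i = j
--         else:
--             i += 1
--     return blocks
-- ===== Notes on version B (the rewrite author's own statement) =====
-- stated objective: alternative
-- what changed: Replaces A's accumulator state machine (current list plus post-loop flush) with a run-grouping scan: strip all lines first, then jump over each maximal consecutive run of pipe-containing lines and append the whole slice at once.
import Mathlib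
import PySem

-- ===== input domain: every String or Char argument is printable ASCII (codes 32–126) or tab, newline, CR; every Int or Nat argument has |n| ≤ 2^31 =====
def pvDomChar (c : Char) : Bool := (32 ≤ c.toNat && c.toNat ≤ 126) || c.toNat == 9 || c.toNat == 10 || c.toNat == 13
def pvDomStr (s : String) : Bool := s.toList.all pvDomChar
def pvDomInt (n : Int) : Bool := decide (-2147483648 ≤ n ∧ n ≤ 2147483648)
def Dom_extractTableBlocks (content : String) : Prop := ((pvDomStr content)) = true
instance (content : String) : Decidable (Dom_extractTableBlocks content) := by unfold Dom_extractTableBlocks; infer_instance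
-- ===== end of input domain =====

-- B replaces A's current-accumulator state machine with a run-grouping scan over pre-stripped lines (alternative decomposition, same cost).

-- ===== PORT A =====
def pvStepA (st : List (List String) × List String) (line : String) : List (List String) × List String :=
  let stripped := PySem.Str.strip line
  if PySem.Str.isIn "|" stripped then (st.1, st.2 ++ [stripped])
  else if st.2 ≠ [] then (st.1 ++ [st.2], []) else st

def extractTableBlocks (content : String) : List (List String) :=
  let lines := (PySem.Str.split? content "\n").getD []
  let st := lines.foldl pvStepA ([], [])
  if st.2 ≠ [] then st.1 ++ [st.2] else st.1

-- ===== PORT B =====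
def pvPipe (s : String) : Bool := PySem.Str.isIn "|" s

-- Source B's index scan rendered as structural recursion: the inner while collecting lines[i:j] is takeWhile, the jump i := j is dropWhile
def pvRuns : List String → List (List String)
  | [] => []
  | l :: ls =>
      if pvPipe l then (l :: ls.takeWhile pvPipe) :: pvRuns (ls.dropWhile pvPipe)
      else pvRuns ls
termination_by ls => ls.length
decreasing_by
  · exact Nat.lt_succ_of_le (ls.length_dropWhile_le pvPipe)
  · exact Nat.lt_succ_self _

def extractTableBlocks_alt (content : String) : List (List String) :=
  pvRuns (((PySem.Str.split? content "\n").getD []).map PySem.Str.strip)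

-- ===== PRECONDITION & SPEC =====
def Spec_extractTableBlocks (content : String) (out : List (List String)) : Prop := out = extractTableBlocks_alt content
instance (content : String) (out : List (List String)) : Decidable (Spec_extractTableBlocks content out) := by unfold Spec_extractTableBlocks; infer_instance

-- ===== CLAIM (what is proved, stated in full; the proofs are below) =====
def Claim_equal_extractTableBlocks : Prop := ∀ (content : String), Dom_extractTableBlocks content → Spec_extractTableBlocks content (extractTableBlocks content)

-- ===== LEMMAS AND PROOFS =====
-- A's loop state, written as a recursion on the (already stripped) lines with the pending block as argument
def pvMerge : List String → List String → List (List String)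
  | cur, [] => if cur = [] then [] else [cur]
  | cur, l :: ls =>
      if pvPipe l then pvMerge (cur ++ [l]) ls
      else (if cur = [] then [] else [cur]) ++ pvMerge [] ls

theorem pvFoldl_eq_merge (ls : List String) (blocks : List (List String)) (cur : List String) :
    (let st := ls.foldl pvStepA (blocks, cur);
     if st.2 ≠ [] then st.1 ++ [st.2] else st.1) = blocks ++ pvMerge cur (ls.map PySem.Str.strip) := by
  induction ls generalizing blocks cur with
  | nil =>
      simp only [List.foldl_nil, List.map_nil, pvMerge]
      by_cases h : cur = [] <;> simp [h]
  | cons l ls ih =>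
      by_cases hp : PySem.Chars.isIn ['|'] (PySem.Chars.strip l.toList) = true
      · simp [List.foldl_cons, pvMerge, pvStepA, pvPipe, hp, ih]
      · by_cases hc : cur = [] <;>
          simp [List.foldl_cons, pvMerge, pvStepA, pvPipe, hp, hc, ih]

theorem pvMerge_eq_runs (ls : List String) (cur : List String) :
    pvMerge cur ls =
      if cur = [] then pvRuns ls
      else (cur ++ ls.takeWhile pvPipe) :: pvRuns (ls.dropWhile pvPipe) := by
  induction ls generalizing cur with
  | nil =>
      by_cases h : cur = [] <;> simp [pvMerge, pvRuns, h]
  | cons l ls ih =>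
      by_cases hp : pvPipe l = true
      · by_cases hc : cur = [] <;>
          simp [pvMerge, pvRuns, hp, ih, hc]
      · have hp' : pvPipe l = false := eq_false_of_ne_true hp
        by_cases hc : cur = [] <;>
          simp [pvMerge, pvRuns, hp', ih, hc]

-- ===== VERDICT (by name: the statement is the Claim_ definition above) =====
theorem extractTableBlocks_spec : Claim_equal_extractTableBlocks := by
  intro content _
  show extractTableBlocks content = extractTableBlocks_alt content
  unfold extractTableBlocks extractTableBlocks_alt
  rw [pvFoldl_eq_merge, pvMerge_eq_runs]
  simp
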